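-- pv_equiv track=rewrite | github.com/yannickloth/W33-Theory | pillars/THEORY_PART_CCXXIII_E8_THETA_SERIES.py | compute_delta_coefficients
-- ===== SOURCE A (Python) =====
-- from typing import List, Tuple, Dict
--
-- def compute_delta_coefficients(N: int) -> List[int]:
--     """
--     Compute Delta = eta^24 = q * prod_{n>=1}(1-q^n)^24
--
--     Delta[0] = 0, Delta[1] = 1, Delta[2] = -24, ...
--     These are the Ramanujan tau function values.
--     """
--     # Compute prod(1-q^n)^24 up to q^(N-1)
--     # Start with [1, 0, 0, ...]
--     prod_coeffs = [0] * N
--     prod_coeffs[0] = 1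
--
--     for n in range(1, N):
--         # Multiply by (1 - q^n)^24
--         # (1-x)^24 = sum_{k=0}^{24} C(24,k)*(-1)^k * x^k
--         # But we apply this as multiplying our series by (1 - q^n)^24
--         # Equivalent to applying (1-q^n) 24 times
--         for _ in range(24):
--             for m in range(N - 1, n - 1, -1):
--                 prod_coeffs[m] -= prod_coeffs[m - n]
--
--     # Delta = q * prod = shift by 1
--     delta = [0] * N
--     for i in range(N - 1):
--         delta[i + 1] = prod_coeffs[i]
--
--     return delta
-- ===== SOURCE B (Python) =====
-- def compute_delta_coefficients(N: int) -> list: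
--     """
--     Compute Delta = eta^24 = q * prod_{n>=1}(1-q^n)^24 truncated at q^(N-1):
--     build eta = prod(1-q^n) once (one functional pass per n), then raise it
--     to the 24th power with five truncated multiplications (binary powering),
--     instead of applying (1-q^n) twenty-four times for every n.
--     """
--     # eta = prod_{n=1}^{N-1} (1 - q^n) mod q^N
--     e = [1 if m == 0 else 0 for m in range(N)]
--     for n in range(1, N):
--         e = [e[m] - (e[m - n] if m >= n else 0) for m in range(N)]
--
--     def mul(a, b):
--         # truncated product mod q^N
--         return [sum(a[i] * b[k - i] for i in range(k + 1)) for k in range(N)]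
--
--     e2 = mul(e, e)
--     e4 = mul(e2, e2)
--     e8 = mul(e4, e4)
--     e16 = mul(e8, e8)
--     e24 = mul(e16, e8)
--
--     # Delta = q * eta^24
--     return [0] + e24[:N - 1]
-- ===== Notes on version B (the rewrite author's own statement) =====
-- stated objective: faster
-- what changed: A applies (1-q^n) twenty-four times in place for every n; B builds eta = prod(1-q^n) once (one pass per n) and raises it to the 24th power with five truncated multiplications by binary powering, cutting the coefficient-update count roughly fourfold.
-- outside the precondition, e.g. on compute_delta_coefficients(0): A raises IndexError, B returns [0]
import Mathlib
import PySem

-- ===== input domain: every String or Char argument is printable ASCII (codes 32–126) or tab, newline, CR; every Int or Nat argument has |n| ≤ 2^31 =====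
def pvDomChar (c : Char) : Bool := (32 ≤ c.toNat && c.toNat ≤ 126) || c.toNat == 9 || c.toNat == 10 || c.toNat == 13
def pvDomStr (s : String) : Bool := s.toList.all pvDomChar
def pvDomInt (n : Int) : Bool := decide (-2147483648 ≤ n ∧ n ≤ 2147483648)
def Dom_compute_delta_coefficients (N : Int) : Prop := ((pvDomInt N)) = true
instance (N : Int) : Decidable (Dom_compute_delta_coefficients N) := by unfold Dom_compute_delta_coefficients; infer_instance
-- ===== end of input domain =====

-- B computes the same truncated q-expansion of Delta = q·∏(1-q^n)^24, but builds eta = ∏(1-q^n)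
-- once and raises it to the 24th power with five truncated multiplications (binary powering),
-- instead of A's twenty-four in-place (1-q^n) passes per n; equivalence proved on 1 ≤ N.

-- ===== PORT A =====
def compute_delta_coefficients (N : Int) : List Int :=
  -- prod_coeffs = [0] * N ; prod_coeffs[0] = 1  (IndexError when N ≤ 0 → Pre_)
  let prod0 : List Int := List.replicate N.toNat 0
  let prod1 := PySem.List.pySetD prod0 0 1
  -- for n in range(1, N): for _ in range(24): backward in-place pass prod[m] -= prod[m-n]
  let prod := (PySem.List.pyRange 1 N 1).foldl (fun a n =>
      (List.range 24).foldl (fun a _ =>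
        (PySem.List.pyRange (N-1) (n-1) (-1)).foldl (fun a m =>
          PySem.List.pySetD a m (PySem.List.pyGetD a m 0 - PySem.List.pyGetD a (m-n) 0)) a) a) prod1
  -- delta = [0]*N ; for i in range(N-1): delta[i+1] = prod[i]
  let delta0 : List Int := List.replicate N.toNat 0
  (PySem.List.pyRange 0 (N-1) 1).foldl (fun d i =>
    PySem.List.pySetD d (i+1) (PySem.List.pyGetD prod i 0)) delta0

-- ===== PORT B =====
-- truncated product mod q^N: [sum(a[i]*b[k-i] for i in range(k+1)) for k in range(N)]
def pvMulT (N : Int) (a b : List Int) : List Int :=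
  (PySem.List.pyRange 0 N 1).map (fun k =>
    ((PySem.List.pyRange 0 (k+1) 1).map (fun i =>
      PySem.List.pyGetD a i 0 * PySem.List.pyGetD b (k - i) 0)).sum)

def compute_delta_coefficients_alt (N : Int) : List Int :=
  -- e = [1 if m == 0 else 0 for m in range(N)]; one functional (1-q^n) pass per n
  let e0 : List Int := (PySem.List.pyRange 0 N 1).map (fun m => if m == 0 then (1:Int) else 0)
  let e := (PySem.List.pyRange 1 N 1).foldl (fun e n =>
      (PySem.List.pyRange 0 N 1).map (fun m =>
        PySem.List.pyGetD e m 0 - (if m ≥ n then PySem.List.pyGetD e (m - n) 0 else 0))) e0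
  -- e^24 by binary powering: e2, e4, e8, e16, e24 = e16*e8
  let e2 := pvMulT N e e
  let e4 := pvMulT N e2 e2
  let e8 := pvMulT N e4 e4
  let e16 := pvMulT N e8 e8
  let e24 := pvMulT N e16 e8
  -- return [0] + e24[:N-1]
  0 :: PySem.List.slice e24 none (some (N - 1))

-- ===== PRECONDITION & SPEC =====
-- Pre_ excludes N ≤ 0, where A raises IndexError at 'prod_coeffs[0] = 1'.
def Pre_compute_delta_coefficients (N : Int) : Prop := 1 ≤ N
instance (N : Int) : Decidable (Pre_compute_delta_coefficients N) := by
  unfold Pre_compute_delta_coefficients; infer_instance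

def pvWitness_compute_delta_coefficients : Int := 3

def Spec_compute_delta_coefficients (N : Int) (out : List Int) : Prop := out = compute_delta_coefficients_alt N
instance (N : Int) (out : List Int) : Decidable (Spec_compute_delta_coefficients N out) := by unfold Spec_compute_delta_coefficients; infer_instance

-- ===== CLAIM (what is proved, stated in full; the proofs are below) =====
def Claim_equal_compute_delta_coefficients : Prop := ∀ (N : Int), Dom_compute_delta_coefficients N → Pre_compute_delta_coefficients N → Spec_compute_delta_coefficients N (compute_delta_coefficients N)

-- ===== LEMMAS AND PROOFS =====

-- a[k] of a list after one assignment
theorem pvGetDSet (l : List Int) (i k : ℕ) (v d : Int) :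
    (l.set i v).getD k d = if i = k ∧ i < l.length then v else l.getD k d := by
  simp only [List.getD_eq_getElem?_getD, List.getElem?_set]
  split_ifs with h1 h2 h3 <;> simp_all
  omega

-- "the first Nn entries of a are the coefficients of p"
def pvRep (Nn : ℕ) (a : List Int) (p : Polynomial ℤ) : Prop :=
  a.length = Nn ∧ ∀ k, k < Nn → a.getD k 0 = p.coeff k

theorem pvCoeffMul (n : ℕ) (p : Polynomial ℤ) (k : ℕ) :
    ((1 - Polynomial.X ^ n) * p).coeff k
      = p.coeff k - if n ≤ k then p.coeff (k - n) else 0 := by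
  rw [sub_mul, one_mul, Polynomial.coeff_sub, mul_comm, Polynomial.coeff_mul_X_pow']

-- A's backward in-place pass, in Nat form: indices n+j-1 down to n
def pvPassNat (n : ℕ) : ℕ → List Int → List Int
  | 0, a => a
  | j+1, a => pvPassNat n j (a.set (n+j) (a.getD (n+j) 0 - a.getD j 0))

theorem pvPassNat_length (n j : ℕ) : ∀ a : List Int, (pvPassNat n j a).length = a.length := by
  induction j with
  | zero => intro a; rfl
  | succ j ih => intro a; simp [pvPassNat, ih]

theorem pvPassNat_getD (n j : ℕ) (hn : 1 ≤ n) :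
    ∀ a : List Int, n + j ≤ a.length → ∀ k, k < a.length →
    (pvPassNat n j a).getD k 0 =
      if n ≤ k ∧ k < n + j then a.getD k 0 - a.getD (k - n) 0 else a.getD k 0 := by
  induction j with
  | zero =>
      intro a _ k _
      simp [pvPassNat]
  | succ j ih =>
      intro a hlen k hk
      have h := ih (a.set (n+j) (a.getD (n+j) 0 - a.getD j 0)) (by rw [List.length_set]; omega) k (by rw [List.length_set]; omega)
      rw [pvPassNat, h]
      rw [pvGetDSet, pvGetDSet]
      by_cases h1 : n ≤ k ∧ k < n + j
      · have e1 : ¬ (n + j = k ∧ n + j < a.length) := by omega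
        have e2 : ¬ (n + j = k - n ∧ n + j < a.length) := by omega
        simp only [if_pos h1, if_neg e1, if_neg e2]
        have : n ≤ k ∧ k < n + (j+1) := by omega
        rw [if_pos this]
      · rw [if_neg h1]
        by_cases h2 : k = n + j
        · have e1 : n + j = k ∧ n + j < a.length := by omega
          rw [if_pos e1]
          have : n ≤ k ∧ k < n + (j+1) := by omega
          rw [if_pos this, h2]
          congr 1
          congr 1
          omega
        · have e1 : ¬ (n + j = k ∧ n + j < a.length) := by omega
          rw [if_neg e1]
          have : ¬ (n ≤ k ∧ k < n + (j+1)) := by omega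
          rw [if_neg this]

-- the Python descending fold IS pvPassNat
theorem pvBridge (n : Int) (hn : 1 ≤ n) (j : ℕ) :
    ∀ a : List Int,
    (PySem.List.pyRange (n - 1 + j) (n-1) (-1)).foldl
      (fun a m => PySem.List.pySetD a m (PySem.List.pyGetD a m 0 - PySem.List.pyGetD a (m-n) 0)) a
    = pvPassNat n.toNat j a := by
  induction j with
  | zero =>
      intro a
      rw [show ((n - 1 + (0:ℕ) : Int)) = n - 1 by simp]
      rw [PySem.List.pyRange_neg_one_eq_nil (le_refl _)]
      rfl
  | succ j ih =>
      intro a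
      have ht : (n - 1 : Int) < n - 1 + (j+1 : ℕ) := by push_cast; omega
      rw [PySem.List.pyRange_neg_one_cons ht, List.foldl_cons]
      have e1 : (n - 1 + ((j:ℕ)+1 : ℕ) : Int) - 1 = n - 1 + (j:ℕ) := by push_cast; ring
      rw [e1, ih]
      have hnn : (0:Int) ≤ n - 1 + ((j:ℕ)+1 : ℕ) := by push_cast; omega
      have hsub : (0:Int) ≤ (n - 1 + ((j:ℕ)+1 : ℕ)) - n := by push_cast; omega
      rw [PySem.List.pySetD_of_nonneg _ _ hnn, PySem.List.pyGetD_of_nonneg _ _ hnn,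
          PySem.List.pyGetD_of_nonneg _ _ hsub]
      have e2 : ((n - 1 + ((j:ℕ)+1 : ℕ) : Int)).toNat = n.toNat + j := by push_cast; omega
      have e3 : (((n - 1 + ((j:ℕ)+1 : ℕ)) - n : Int)).toNat = j := by push_cast; omega
      rw [e2, e3]
      rfl

theorem pvPassA_rep (N n : Int) (hn : 1 ≤ n) (hnN : n < N) (a : List Int) (p : Polynomial ℤ)
    (h : pvRep N.toNat a p) :
    pvRep N.toNat
      ((PySem.List.pyRange (N-1) (n-1) (-1)).foldl
        (fun a m => PySem.List.pySetD a m (PySem.List.pyGetD a m 0 - PySem.List.pyGetD a (m-n) 0)) a)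
      ((1 - Polynomial.X ^ n.toNat) * p) := by
  obtain ⟨hlen, hco⟩ := h
  have e0 : (N - 1 : Int) = n - 1 + ((N - n).toNat : ℕ) := by omega
  rw [e0, pvBridge n hn]
  have hj : n.toNat + (N - n).toNat ≤ a.length := by omega
  constructor
  · rw [pvPassNat_length]; exact hlen
  · intro k hk
    rw [pvPassNat_getD _ _ (by omega) a hj k (by omega), pvCoeffMul]
    by_cases hc : n.toNat ≤ k
    · have : n.toNat ≤ k ∧ k < n.toNat + (N - n).toNat := by omega
      rw [if_pos this, if_pos hc, hco k hk, hco (k - n.toNat) (by omega)]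
    · have : ¬ (n.toNat ≤ k ∧ k < n.toNat + (N - n).toNat) := by omega
      rw [if_neg this, if_neg hc, hco k hk, sub_zero]

theorem pvA24_rep (N n : Int) (hn : 1 ≤ n) (hnN : n < N) (m : ℕ) :
    ∀ (a : List Int) (p : Polynomial ℤ), pvRep N.toNat a p →
    pvRep N.toNat
      ((List.range m).foldl (fun a _ =>
        (PySem.List.pyRange (N-1) (n-1) (-1)).foldl
          (fun a m => PySem.List.pySetD a m (PySem.List.pyGetD a m 0 - PySem.List.pyGetD a (m-n) 0)) a) a)
      ((1 - Polynomial.X ^ n.toNat) ^ m * p) := by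
  induction m with
  | zero => intro a p h; simpa using h
  | succ m ih =>
      intro a p h
      rw [List.range_succ, List.foldl_append]
      have := pvPassA_rep N n hn hnN _ _ (ih a p h)
      simpa [pow_succ, mul_assoc, mul_left_comm, mul_comm] using this

-- a fold of rep-preserving multiplication steps represents the product
theorem pvFoldMul_rep (Nn : ℕ) (N : Int) (F : Int → Polynomial ℤ) (step : List Int → Int → List Int)
    (hstep : ∀ a p n, 1 ≤ n → n < N → pvRep Nn a p → pvRep Nn (step a n) (F n * p)) :
    ∀ (l : List Int), (∀ x ∈ l, 1 ≤ x ∧ x < N) → ∀ a p, pvRep Nn a p →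
    pvRep Nn (l.foldl step a) ((l.map F).prod * p) := by
  intro l
  induction l with
  | nil => intro _ a p h; simpa using h
  | cons n t ih =>
      intro hmem a p h
      have h1 := hstep a p n (hmem n (by simp)).1 (hmem n (by simp)).2 h
      have h2 := ih (fun x hx => hmem x (by simp [hx])) _ _ h1
      simpa [mul_assoc, mul_left_comm, mul_comm] using h2

theorem pvPassB_rep (N n : Int) (hn : 1 ≤ n) (a : List Int) (p : Polynomial ℤ)
    (h : pvRep N.toNat a p) :
    pvRep N.toNat
      ((PySem.List.pyRange 0 N 1).map (fun m =>
        PySem.List.pyGetD a m 0 - (if m ≥ n then PySem.List.pyGetD a (m - n) 0 else 0)))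
      ((1 - Polynomial.X ^ n.toNat) * p) := by
  obtain ⟨hlen, hco⟩ := h
  have hlen2 : ((PySem.List.pyRange 0 N 1).map (fun m =>
      PySem.List.pyGetD a m 0 - (if m ≥ n then PySem.List.pyGetD a (m - n) 0 else 0))).length
      = N.toNat := by
    simp [PySem.List.length_pyRange_one]
  refine ⟨hlen2, ?_⟩
  intro k hk
  rw [List.getD_eq_getElem _ _ (by omega)]
  rw [List.getElem_map]
  rw [PySem.List.getElem_pyRange_one 0 N k (by simp [PySem.List.length_pyRange_one]; omega)]
  rw [zero_add, pvCoeffMul]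
  by_cases hc : n ≤ (k : Int)
  · have hge : (k:Int) ≥ n := hc
    rw [if_pos hge, PySem.List.pyGetD_natCast,
        show ((k:Int) - n) = ((k - n.toNat : ℕ) : Int) by omega, PySem.List.pyGetD_natCast]
    have hcn : n.toNat ≤ k := by omega
    rw [if_pos hcn, hco k hk, hco (k - n.toNat) (by omega)]
  · rw [if_neg hc, PySem.List.pyGetD_natCast]
    have hcn : ¬ n.toNat ≤ k := by omega
    rw [if_neg hcn, hco k hk]

theorem pvSumRange (n : ℕ) (f : ℕ → ℤ) :
    ((List.range n).map f).sum = ∑ i ∈ Finset.range n, f i := rfl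

theorem pvMulT_rep (N : Int) (a b : List Int) (p q : Polynomial ℤ)
    (ha : pvRep N.toNat a p) (hb : pvRep N.toNat b q) :
    pvRep N.toNat (pvMulT N a b) (p * q) := by
  obtain ⟨hal, hac⟩ := ha
  obtain ⟨hbl, hbc⟩ := hb
  refine ⟨by simp [pvMulT, PySem.List.length_pyRange_one], ?_⟩
  intro k hk
  rw [List.getD_eq_getElem _ _ (by simp [pvMulT, PySem.List.length_pyRange_one]; omega)]
  unfold pvMulT
  rw [List.getElem_map,
      PySem.List.getElem_pyRange_one 0 N k (by simp [PySem.List.length_pyRange_one]; omega), zero_add]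
  rw [show ((k:Int) + 1) = ((k + 1 : ℕ) : Int) by push_cast; ring,
      PySem.List.pyRange_zero_natCast, List.map_map]
  have hmap : ∀ i ∈ List.range (k+1),
      ((fun i => PySem.List.pyGetD a i 0 * PySem.List.pyGetD b ((k:Int) - i) 0) ∘ (fun j : ℕ => (j:Int))) i
      = a.getD i 0 * b.getD (k - i) 0 := by
    intro i hi
    have hik : i ≤ k := by simp [List.mem_range] at hi; omega
    simp only [Function.comp]
    rw [PySem.List.pyGetD_natCast,
        show ((k:Int) - (i:Int)) = ((k - i : ℕ) : Int) by omega, PySem.List.pyGetD_natCast]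
  rw [List.map_congr_left hmap, pvSumRange, Polynomial.coeff_mul,
      Finset.Nat.sum_antidiagonal_eq_sum_range_succ_mk]
  apply Finset.sum_congr rfl
  intro i hi
  have hik : i ≤ k := by simp at hi; omega
  rw [hac i (by omega), hbc (k - i) (by omega)]

theorem pvProdMapPow (l : List (Polynomial ℤ)) (m : ℕ) :
    (l.map (· ^ m)).prod = l.prod ^ m := by
  induction l with
  | nil => simp
  | cons x t ih => simp [ih, mul_pow]

theorem pvInit_rep (N : Int) (hN : 1 ≤ N) :
    pvRep N.toNat (PySem.List.pySetD (List.replicate N.toNat 0) 0 1) (1 : Polynomial ℤ) := by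
  rw [PySem.List.pySetD_of_nonneg _ _ (by omega : (0:Int) ≤ 0)]
  refine ⟨by simp, ?_⟩
  intro k hk
  rw [Polynomial.coeff_one]
  by_cases h0 : k = 0
  · subst h0
    rw [List.getD_eq_getElem _ _ (by simp; omega)]
    simp
  · rw [List.getD_eq_getElem _ _ (by simp; omega)]
    simp [List.getElem_set, h0]
    omega

theorem pvE0_rep (N : Int) (hN : 1 ≤ N) :
    pvRep N.toNat ((PySem.List.pyRange 0 N 1).map (fun m => if m == 0 then (1:Int) else 0))
      (1 : Polynomial ℤ) := by
  refine ⟨by simp [PySem.List.length_pyRange_one], ?_⟩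
  intro k hk
  rw [List.getD_eq_getElem _ _ (by simp [PySem.List.length_pyRange_one]; omega), List.getElem_map,
      PySem.List.getElem_pyRange_one 0 N k (by simp [PySem.List.length_pyRange_one]; omega), zero_add,
      Polynomial.coeff_one]
  by_cases h0 : k = 0 <;> simp [h0]

theorem pvDelta_fold (N : Int) (_hN : 1 ≤ N) (pr : List Int) (j : ℕ) (hj : (j:Int) ≤ N - 1) :
    ((PySem.List.pyRange 0 (j:Int) 1).foldl (fun d i =>
        PySem.List.pySetD d (i+1) (PySem.List.pyGetD pr i 0)) (List.replicate N.toNat 0)).length = N.toNat ∧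
    ∀ k, k < N.toNat →
    ((PySem.List.pyRange 0 (j:Int) 1).foldl (fun d i =>
        PySem.List.pySetD d (i+1) (PySem.List.pyGetD pr i 0)) (List.replicate N.toNat 0)).getD k 0 =
      if 1 ≤ k ∧ k ≤ j then pr.getD (k-1) 0 else 0 := by
  induction j with
  | zero =>
      rw [show ((0:ℕ):Int) = 0 by rfl, PySem.List.pyRange_one_eq_nil (le_refl 0)]
      refine ⟨by simp, ?_⟩
      intro k hk
      have : ¬ (1 ≤ k ∧ k ≤ 0) := by omega
      rw [if_neg this]
      simp
  | succ j ih =>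
      obtain ⟨ihl, ihg⟩ := ih (by push_cast at hj ⊢; omega)
      rw [show ((j+1 : ℕ):Int) = (j:Int) + 1 by push_cast; ring,
          PySem.List.pyRange_one_succ_right (by omega), List.foldl_append, List.foldl_cons,
          List.foldl_nil]
      rw [PySem.List.pySetD_of_nonneg _ _ (by omega : (0:Int) ≤ (j:Int)+1),
          PySem.List.pyGetD_of_nonneg _ _ (by omega : (0:Int) ≤ (j:Int))]
      rw [show ((j:Int)+1).toNat = j+1 by omega, show ((j:Int)).toNat = j by omega]
      refine ⟨by simp [ihl], ?_⟩
      intro k hk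
      rw [pvGetDSet]
      set L := (PySem.List.pyRange 0 (j:Int) 1).foldl (fun d i =>
        PySem.List.pySetD d (i+1) (PySem.List.pyGetD pr i 0)) (List.replicate N.toNat 0) with hL
      by_cases hc : j + 1 = k ∧ j + 1 < L.length
      · rw [if_pos hc]
        have : 1 ≤ k ∧ k ≤ j + 1 := by omega
        rw [if_pos this]
        have : j = k - 1 := by omega
        rw [this]
      · rw [if_neg hc, ihg k hk]
        rw [ihl] at hc
        by_cases h1 : 1 ≤ k ∧ k ≤ j
        · rw [if_pos h1, if_pos (by omega)]
        · rw [if_neg h1, if_neg (by omega)]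

-- assembling the two result lists from a common polynomial representation
theorem pvFinal (N : Int) (hN : 1 ≤ N) (prA e24 : List Int) (P Q : Polynomial ℤ)
    (hA : pvRep N.toNat prA P) (hB : pvRep N.toNat e24 Q) (hPQ : P = Q) :
    (PySem.List.pyRange 0 (N-1) 1).foldl (fun d i =>
      PySem.List.pySetD d (i+1) (PySem.List.pyGetD prA i 0)) (List.replicate N.toNat 0)
    = 0 :: PySem.List.slice e24 none (some (N - 1)) := by
  subst hPQ
  obtain ⟨hAl, hAc⟩ := hA
  obtain ⟨hBl, hBc⟩ := hB
  set M : ℕ := (N-1).toNat with hM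
  have hNM : (N - 1 : Int) = (M : Int) := by omega
  obtain ⟨hDl, hDc⟩ := pvDelta_fold N hN prA M (by omega)
  rw [hNM, PySem.List.slice_to_natCast]
  apply List.ext_getElem
  · rw [hDl]
    simp [hBl]
    omega
  · intro i h1 h2
    rw [← List.getD_eq_getElem _ 0 h1, ← List.getD_eq_getElem _ 0 h2]
    rw [hDl] at h1
    rw [hDc i h1]
    match i with
    | 0 => simp
    | (i+1) =>
        rw [List.getD_cons_succ]
        rw [if_pos (by omega : 1 ≤ i + 1 ∧ i + 1 ≤ M)]
        have hiM : i < M := by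
          simp [hBl] at h2
          omega
        have e1 : (List.take M e24).getD i 0 = e24.getD i 0 := by
          rw [List.getD_eq_getElem _ _ (by simp [hBl]; omega),
              List.getD_eq_getElem _ _ (by rw [hBl]; omega)]
          exact List.getElem_take
        rw [e1, show i + 1 - 1 = i from rfl, hAc i (by omega), hBc i (by omega)]

-- ===== VERDICT (by name: the statement is the Claim_ definition above) =====
theorem compute_delta_coefficients_spec : Claim_equal_compute_delta_coefficients := by
  intro N _ hN
  unfold Pre_compute_delta_coefficients at hN
  unfold Spec_compute_delta_coefficients compute_delta_coefficients compute_delta_coefficients_alt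
  set E : Polynomial ℤ := ((PySem.List.pyRange 1 N 1).map (fun n => 1 - Polynomial.X ^ n.toNat)).prod with hE
  clear_value E
  have hmem : ∀ x ∈ PySem.List.pyRange 1 N 1, 1 ≤ x ∧ x < N := by
    intro x hx
    rw [PySem.List.mem_pyRange_one] at hx
    exact hx
  -- A's accumulator represents E^24
  have hA := pvFoldMul_rep N.toNat N (fun n => (1 - Polynomial.X ^ n.toNat) ^ 24)
      (fun a n => (List.range 24).foldl (fun a _ =>
        (PySem.List.pyRange (N-1) (n-1) (-1)).foldl
          (fun a m => PySem.List.pySetD a m (PySem.List.pyGetD a m 0 - PySem.List.pyGetD a (m-n) 0)) a) a)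
      (fun a p n h1 h2 h => pvA24_rep N n h1 h2 24 a p h)
      (PySem.List.pyRange 1 N 1) hmem _ _ (pvInit_rep N hN)
  rw [mul_one] at hA
  have hEpow : ((PySem.List.pyRange 1 N 1).map (fun n => (1 - Polynomial.X ^ n.toNat) ^ 24)).prod
      = E ^ 24 := by
    rw [hE, show (fun n : Int => (1 - Polynomial.X ^ n.toNat) ^ 24)
        = (fun q : Polynomial ℤ => q ^ 24) ∘ (fun n : Int => 1 - Polynomial.X ^ n.toNat) by rfl,
      ← List.map_map]
    exact pvProdMapPow _ 24
  rw [hEpow] at hA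
  -- B's eta and its binary powers
  have hB := pvFoldMul_rep N.toNat N (fun n => 1 - Polynomial.X ^ n.toNat)
      (fun e n => (PySem.List.pyRange 0 N 1).map (fun m =>
        PySem.List.pyGetD e m 0 - (if m ≥ n then PySem.List.pyGetD e (m - n) 0 else 0)))
      (fun a p n h1 _ h => pvPassB_rep N n h1 a p h)
      (PySem.List.pyRange 1 N 1) hmem _ _ (pvE0_rep N hN)
  rw [mul_one, ← hE] at hB
  have h2 := pvMulT_rep N _ _ _ _ hB hB
  have h4 := pvMulT_rep N _ _ _ _ h2 h2
  have h8 := pvMulT_rep N _ _ _ _ h4 h4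
  have h16 := pvMulT_rep N _ _ _ _ h8 h8
  have h24 := pvMulT_rep N _ _ _ _ h16 h8
  exact pvFinal N hN _ _ _ _ hA h24 (by ring)
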